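-- pv_equiv track=rewrite | github.com/ransomeye/rebuild | ransomeye_threat_intel/clusterer/clusterer.py | _merge_campaigns
-- ===== SOURCE A (Python) =====
-- from typing import Dict, Any, List, Optional, Set
--
-- def _merge_campaigns(
--
--     campaigns1: Dict[int, List[str]],
--     campaigns2: Dict[int, List[str]]
-- ) -> Dict[int, List[str]]:
--     """
--     Merge two campaign dictionaries.
--
--     Args:
--         campaigns1: First campaign dict
--         campaigns2: Second campaign dict
--
--     Returns:
--         Merged campaigns
--     """
--     merged = campaigns1.copy()
--     next_id = max(merged.keys(), default=-1) + 1
--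
--     for campaign_id, ioc_ids in campaigns2.items():
--         # Check for overlap
--         merged_into = None
--         for existing_id, existing_iocs in merged.items():
--             if set(ioc_ids) & set(existing_iocs):
--                 merged_into = existing_id
--                 break
--
--         if merged_into is not None:
--             # Merge into existing campaign
--             merged[merged_into].extend([ioc_id for ioc_id in ioc_ids if ioc_id not in merged[merged_into]])
--         else:
--             # Create new campaign
--             merged[next_id] = ioc_ids
--             next_id += 1
--
--     return merged
-- ===== SOURCE B (Python) =====
-- from typing import Dict, List
--
-- def _merge_campaigns(
--     campaigns1: Dict[int, List[str]],
--     campaigns2: Dict[int, List[str]]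
-- ) -> Dict[int, List[str]]:
--     # Ordered list of (campaign_id, iocs) plus an ioc -> earliest-position index and a
--     # persistent membership set per campaign, so each campaigns2 entry is placed without
--     # scanning the merged campaigns (and without rebuilding their sets).
--     merged = []           # [(cid, ioc list)] in insertion order
--     have = []             # have[pos] == set of merged[pos]'s iocs
--     index = {}            # ioc -> smallest position of a campaign containing it
--     for cid, iocs in campaigns1.items():
--         pos = len(merged)
--         lst = list(iocs)
--         merged.append((cid, lst))
--         have.append(set(lst))
--         for ioc in lst:
--             if ioc not in index:
--                 index[ioc] = pos
--     next_id = max(campaigns1.keys(), default=-1) + 1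
--     for _cid2, iocs2 in campaigns2.items():
--         hits = [index[ioc] for ioc in iocs2 if ioc in index]
--         if hits:
--             pos = min(hits)
--             hv = have[pos]
--             news = [ioc for ioc in iocs2 if ioc not in hv]
--             merged[pos][1].extend(news)
--             hv.update(news)
--             for ioc in news:
--                 old = index.get(ioc)
--                 if old is None or old > pos:
--                     index[ioc] = pos
--         else:
--             pos = len(merged)
--             lst = list(iocs2)
--             merged.append((next_id, lst))
--             have.append(set(lst))
--             for ioc in iocs2:
--                 if ioc not in index:
--                     index[ioc] = pos
--             next_id += 1
--     return dict(merged)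
-- ===== Notes on version B (the rewrite author's own statement) =====
-- stated objective: faster
-- what changed: Replaces the per-entry linear scan of all merged campaigns (with set() intersections rebuilt per comparison) by an ioc->earliest-campaign-position index and a persistent membership set per campaign, both maintained incrementally; the overlap target is the minimum indexed position and the output dict is rebuilt from an ordered list of pairs.
import Mathlib
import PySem

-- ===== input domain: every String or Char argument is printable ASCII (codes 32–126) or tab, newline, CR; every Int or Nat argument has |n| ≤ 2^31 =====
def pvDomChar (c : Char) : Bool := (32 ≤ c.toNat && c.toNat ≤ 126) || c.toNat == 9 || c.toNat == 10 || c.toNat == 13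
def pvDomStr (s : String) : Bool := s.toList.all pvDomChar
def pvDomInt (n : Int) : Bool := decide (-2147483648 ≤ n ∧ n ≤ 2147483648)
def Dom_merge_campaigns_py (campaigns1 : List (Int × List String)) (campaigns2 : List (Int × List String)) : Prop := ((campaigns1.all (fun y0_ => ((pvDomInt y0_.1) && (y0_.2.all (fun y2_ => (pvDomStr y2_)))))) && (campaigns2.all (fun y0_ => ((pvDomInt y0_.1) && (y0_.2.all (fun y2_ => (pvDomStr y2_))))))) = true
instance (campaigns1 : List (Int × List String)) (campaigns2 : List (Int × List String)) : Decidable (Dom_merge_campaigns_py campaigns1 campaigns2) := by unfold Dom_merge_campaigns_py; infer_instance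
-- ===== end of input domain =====

-- B replaces A's per-entry linear scan over all merged campaigns by an ioc -> earliest-position
-- index maintained incrementally (objective: faster). Equivalence is about the RETURN value only:
-- Python A mutates campaigns1's inner lists in place and aliases campaigns2's lists; B does not.

-- ===== PORT A =====
-- one iteration of A's 'for campaign_id, ioc_ids in campaigns2.items()' loop; state = (merged, next_id)
def pvA_step (st : PySem.Dict Int (List String) × Int) (item : Int × List String) :
    PySem.Dict Int (List String) × Int :=
  -- inner 'for existing_id, existing_iocs in merged.items(): if set(ioc_ids) & set(existing_iocs): break'
  match st.1.items.find? (fun kv => item.2.any (fun i => kv.2.contains i)) with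
  | some kv =>
      -- merged[merged_into].extend([ioc for ioc in ioc_ids if ioc not in merged[merged_into]])
      (st.1.modify kv.1 [] (fun old => old ++ item.2.filter (fun i => !old.contains i)), st.2)
  | none =>
      -- merged[next_id] = ioc_ids; next_id += 1
      (st.1.insert st.2 item.2, st.2 + 1)

def merge_campaigns_py (campaigns1 : List (Int × List String)) (campaigns2 : List (Int × List String)) : List (Int × List String) :=
  let merged := PySem.Dict.ofList campaigns1                     -- merged = campaigns1.copy()
  let next := PySem.List.maxD merged.keys (fun k => k) (-1) + 1  -- max(merged.keys(), default=-1) + 1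
  ((PySem.Dict.ofList campaigns2).items.foldl pvA_step (merged, next)).1.items

-- ===== PORT B =====
-- 'if ioc not in index: index[ioc] = pos'
def pvB_addIoc (pos : Nat) (ix : PySem.Dict String Nat) (i : String) : PySem.Dict String Nat :=
  if ix.contains i then ix else ix.insert i pos

-- 'old = index.get(ioc); if old is None or old > pos: index[ioc] = pos'
def pvB_relax (pos : Nat) (ix : PySem.Dict String Nat) (i : String) : PySem.Dict String Nat :=
  match ix.get? i with
  | none => ix.insert i pos
  | some old => if pos < old then ix.insert i pos else ix

-- the campaigns1 loop: builds merged, the per-campaign member sets and the index in one pass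
def pvB_build (acc : List (Int × List String) × List (PySem.Set String) × PySem.Dict String Nat) :
    List (Int × List String) → List (Int × List String) × List (PySem.Set String) × PySem.Dict String Nat
  | [] => acc
  | kv :: rest =>
      pvB_build (acc.1 ++ [(kv.1, kv.2)], acc.2.1 ++ [PySem.Set.ofList kv.2],
        kv.2.foldl (pvB_addIoc acc.1.length) acc.2.2) rest

-- one iteration of B's loop; state = (merged list, member sets, index, next_id)
def pvB_step (st : List (Int × List String) × List (PySem.Set String) × PySem.Dict String Nat × Int)
    (item : Int × List String) :
    List (Int × List String) × List (PySem.Set String) × PySem.Dict String Nat × Int :=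
  match item.2.filterMap (fun i => st.2.2.1.get? i) with  -- hits = [index[i] for i in iocs2 if i in index]
  | h :: t =>
      let pos := t.foldl min h                            -- pos = min(hits)  (running-min loop)
      let hv := st.2.1.getD pos []                        -- hv = have[pos]; pos < len (proved below), default unreachable
      let news := item.2.filter (fun ioc => !(PySem.Set.contains hv ioc))
      let tkv := st.1.getD pos (0, [])                    -- merged[pos]
      (st.1.set pos (tkv.1, tkv.2 ++ news),               -- merged[pos][1].extend(news)
       st.2.1.set pos (PySem.Set.update hv news),         -- hv.update(news)
       news.foldl (pvB_relax pos) st.2.2.1, st.2.2.2)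
  | [] =>
      (st.1 ++ [(st.2.2.2, item.2)], st.2.1 ++ [PySem.Set.ofList item.2],
       item.2.foldl (pvB_addIoc st.1.length) st.2.2.1, st.2.2.2 + 1)

def merge_campaigns_py_alt (campaigns1 : List (Int × List String)) (campaigns2 : List (Int × List String)) : List (Int × List String) :=
  let b := pvB_build ([], [], PySem.Dict.empty) (PySem.Dict.ofList campaigns1).items
  let next := PySem.List.maxD (PySem.Dict.ofList campaigns1).keys (fun k => k) (-1) + 1
  let fin := (PySem.Dict.ofList campaigns2).items.foldl pvB_step (b.1, b.2.1, b.2.2, next)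
  (PySem.Dict.ofList fin.1).items                         -- return dict(merged)

-- ===== PRECONDITION & SPEC =====
def Spec_merge_campaigns_py (campaigns1 : List (Int × List String)) (campaigns2 : List (Int × List String)) (out : List (Int × List String)) : Prop := out = merge_campaigns_py_alt campaigns1 campaigns2
instance (campaigns1 : List (Int × List String)) (campaigns2 : List (Int × List String)) (out : List (Int × List String)) : Decidable (Spec_merge_campaigns_py campaigns1 campaigns2 out) := by unfold Spec_merge_campaigns_py; infer_instance

-- ===== CLAIM (what is proved, stated in full; the proofs are below) =====
def Claim_equal_merge_campaigns_py : Prop := ∀ (campaigns1 : List (Int × List String)) (campaigns2 : List (Int × List String)), Dom_merge_campaigns_py campaigns1 campaigns2 → Spec_merge_campaigns_py campaigns1 campaigns2 (merge_campaigns_py campaigns1 campaigns2)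

-- ===== LEMMAS AND PROOFS =====

-- the coupling invariant between B's state components
def pvInv (merged : List (Int × List String)) (hvs : List (PySem.Set String))
    (ix : PySem.Dict String Nat) (next : Int) : Prop :=
  (merged.map Prod.fst).Nodup ∧
  (∀ kv ∈ merged, kv.1 < next) ∧
  (∀ j : String, ix.get? j = merged.findIdx? (fun kv => kv.2.contains j)) ∧
  hvs.length = merged.length ∧
  (∀ (p : Nat), p < merged.length → ∀ j : String,
    PySem.Set.contains (hvs.getD p []) j = (merged.getD p (0, [])).2.contains j)

-- B's relax fold computes the pointwise minimum with pos on members of news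
theorem pv_relax_fold (news : List String) (pos : Nat) (ix : PySem.Dict String Nat) (j : String) :
    (news.foldl (pvB_relax pos) ix).get? j =
      if j ∈ news then some (((ix.get? j).map (fun o => min o pos)).getD pos) else ix.get? j := by
  induction news generalizing ix with
  | nil => simp
  | cons x xs IH =>
    rw [List.foldl_cons, IH]
    have hx : ∀ j' : String, (pvB_relax pos ix x).get? j' =
        if j' = x then some (((ix.get? x).map (fun o => min o pos)).getD pos) else ix.get? j' := by
      intro j'
      unfold pvB_relax
      cases hg : ix.get? x with
      | none =>
        rw [PySem.Dict.get?_insert]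
        by_cases hj : j' = x
        · subst hj; simp
        · simp [hj]
      | some old =>
        by_cases hlt : pos < old
        · simp only [hlt, if_true]
          rw [PySem.Dict.get?_insert]
          by_cases hj : j' = x
          · subst hj; simp [Nat.min_eq_right (Nat.le_of_lt hlt)]
          · simp [hj]
        · simp only [hlt, if_false]
          by_cases hj : j' = x
          · subst hj; simp [hg, Nat.min_eq_left (Nat.le_of_not_lt hlt)]
          · simp [hj]
    by_cases hj : j = x
    · subst hj
      by_cases hm : j ∈ xs
      · simp only [hm, if_true, hx j, List.mem_cons, true_or]
        cases hg : ix.get? j <;> simp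
      · simp [hm, hx j]
    · have := hx j
      rw [if_neg hj] at this
      by_cases hm : j ∈ xs <;> simp [hm, hj, this]

-- B's add fold keeps existing entries and fills absent members of l with pos
theorem pv_add_fold (l : List String) (pos : Nat) (ix : PySem.Dict String Nat) (j : String) :
    (l.foldl (pvB_addIoc pos) ix).get? j =
      if j ∈ l then some ((ix.get? j).getD pos) else ix.get? j := by
  induction l generalizing ix with
  | nil => simp
  | cons x xs IH =>
    rw [List.foldl_cons, IH]
    have hx : ∀ j' : String, (pvB_addIoc pos ix x).get? j' =
        if j' = x then some ((ix.get? j').getD pos) else ix.get? j' := by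
      intro j'
      unfold pvB_addIoc
      by_cases hc : ix.contains x = true
      · rcases (PySem.Dict.contains_eq_isSome_get? ix x ▸ hc : (ix.get? x).isSome = true)
          |> Option.isSome_iff_exists.mp with ⟨v, hv⟩
        by_cases hj : j' = x
        · subst hj; simp [hc, hv]
        · simp [hc, hj]
      · simp only [hc, if_false, Bool.false_eq_true]
        rw [PySem.Dict.get?_insert]
        by_cases hj : j' = x
        · subst hj
          have : ix.get? j' = none := by
            cases hg : ix.get? j' with
            | none => rfl
            | some v => rw [PySem.Dict.contains_eq_isSome_get?, hg] at hc; simp at hc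
          simp [this]
        · simp [hj]
    by_cases hj : j = x
    · subst hj
      by_cases hm : j ∈ xs <;> simp [hm, hx j]
    · have := hx j
      rw [if_neg hj] at this
      by_cases hm : j ∈ xs <;> simp [hm, hj, this]

-- findIdx? is unchanged by an update that does not change the predicate at that slot
theorem pv_findIdx_set_same {α : Type} (xs : List α) (n : Nat) (v : α) (p : α → Bool)
    (hn : n < xs.length) (h : p v = p xs[n]) :
    (xs.set n v).findIdx? p = xs.findIdx? p := by
  induction xs generalizing n with
  | nil => simp at hn
  | cons x t IH =>
    cases n with
    | zero => simp only [List.set_cons_zero, List.findIdx?_cons]; simp at h; rw [h]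
    | succ m =>
      simp only [List.set_cons_succ, List.findIdx?_cons]
      simp only [List.getElem_cons_succ] at h
      rw [IH m (by simpa using Nat.lt_of_succ_lt_succ hn) h]

-- findIdx? after making slot n newly satisfy the predicate
theorem pv_findIdx_set_new {α : Type} (xs : List α) (n : Nat) (v : α) (p : α → Bool)
    (hn : n < xs.length) (hv : p v = true) (hold : p xs[n] = false) :
    (xs.set n v).findIdx? p = some (((xs.findIdx? p).map (fun o => min o n)).getD n) := by
  induction xs generalizing n with
  | nil => simp at hn
  | cons x t IH =>
    cases n with
    | zero =>
      simp only [List.getElem_cons_zero] at hold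
      simp only [List.set_cons_zero, List.findIdx?_cons, hv, if_true, hold, Bool.false_eq_true,
        if_false]
      cases h : t.findIdx? p <;> simp
    | succ m =>
      simp only [List.getElem_cons_succ] at hold
      by_cases hx : p x = true
      · simp [List.findIdx?_cons, hx]
      · simp only [List.set_cons_succ, List.findIdx?_cons, hx, Bool.false_eq_true, if_false]
        rw [IH m (by simpa using Nat.lt_of_succ_lt_succ hn) hold]
        cases h : t.findIdx? p <;> simp [Nat.succ_min_succ]

theorem pv_find?_of_findIdx? {α : Type} (xs : List α) (p : α → Bool) (n : Nat)
    (h : xs.findIdx? p = some n) : ∃ hn : n < xs.length, xs.find? p = some xs[n] := by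
  induction xs generalizing n with
  | nil => simp at h
  | cons x t IH =>
    rw [List.findIdx?_cons] at h
    by_cases hx : p x = true
    · rw [if_pos hx] at h
      cases h
      exact ⟨by simp, by simp [hx]⟩
    · rw [if_neg hx] at h
      cases hfi : t.findIdx? p with
      | none => rw [hfi] at h; simp at h
      | some m =>
        rw [hfi] at h
        simp only [Option.map_some] at h
        cases h
        obtain ⟨hm, hf⟩ := IH m hfi
        refine ⟨by simpa using Nat.succ_lt_succ hm, ?_⟩
        simp [hx, hf]

-- the add fold realises the index spec for merged extended by one fresh campaign
theorem pv_add_fold_spec (merged : List (Int × List String)) (ix : PySem.Dict String Nat)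
    (hspec : ∀ j : String, ix.get? j = merged.findIdx? (fun kv => kv.2.contains j))
    (c : Int) (iocs : List String) (j : String) :
    (iocs.foldl (pvB_addIoc merged.length) ix).get? j =
      (merged ++ [(c, iocs)]).findIdx? (fun kv => kv.2.contains j) := by
  rw [pv_add_fold, List.findIdx?_append, ← hspec j]
  by_cases hm : j ∈ iocs
  · have hc : iocs.contains j = true := List.contains_iff_mem.mpr hm
    simp only [hm, if_true, List.findIdx?_cons, hc, if_true, List.findIdx?_nil]
    cases hg : ix.get? j <;> simp
  · have hc : iocs.contains j = false := by
      rw [← Bool.not_eq_true, List.contains_iff_mem]; exact hm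
    simp only [hm, if_false, List.findIdx?_cons, hc, Bool.false_eq_true, if_false,
      List.findIdx?_nil]
    cases hg : ix.get? j <;> simp

theorem pv_mem_update (xs : List String) (st : PySem.Set String) (j : String) :
    j ∈ PySem.Set.update st xs ↔ j ∈ st ∨ j ∈ xs := by
  induction xs generalizing st with
  | nil => simp [PySem.Set.update]
  | cons x rest IH =>
    show j ∈ rest.foldl PySem.Set.add (PySem.Set.add st x) ↔ _
    rw [show rest.foldl PySem.Set.add (PySem.Set.add st x) =
        PySem.Set.update (PySem.Set.add st x) rest from rfl, IH, PySem.Set.mem_add]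
    simp [or_assoc, List.mem_cons]

theorem pv_update_contains (st : PySem.Set String) (xs : List String) (j : String) :
    PySem.Set.contains (PySem.Set.update st xs) j =
      (PySem.Set.contains st j || xs.contains j) := by
  rw [Bool.eq_iff_iff]
  simp only [PySem.Set.contains, Bool.or_eq_true, List.contains_iff_mem]
  exact pv_mem_update xs st j

-- the campaigns1 pass appends the pairs and establishes the index and member-set specs
theorem pv_build_props (xs : List (Int × List String))
    (acc : List (Int × List String) × List (PySem.Set String) × PySem.Dict String Nat)
    (hspec : ∀ j : String, acc.2.2.get? j = acc.1.findIdx? (fun kv => kv.2.contains j))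
    (hlen : acc.2.1.length = acc.1.length)
    (hhave : ∀ (p : Nat), p < acc.1.length → ∀ j : String,
      PySem.Set.contains (acc.2.1.getD p []) j = (acc.1.getD p (0, [])).2.contains j) :
    (pvB_build acc xs).1 = acc.1 ++ xs ∧
    (∀ j : String, (pvB_build acc xs).2.2.get? j =
      (acc.1 ++ xs).findIdx? (fun kv => kv.2.contains j)) ∧
    (pvB_build acc xs).2.1.length = (acc.1 ++ xs).length ∧
    (∀ (p : Nat), p < (acc.1 ++ xs).length → ∀ j : String,
      PySem.Set.contains ((pvB_build acc xs).2.1.getD p []) j =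
        ((acc.1 ++ xs).getD p (0, [])).2.contains j) := by
  induction xs generalizing acc with
  | nil =>
    refine ⟨by simp [pvB_build], fun j => by simpa using hspec j, by simpa using hlen, ?_⟩
    intro p hp j
    rw [List.append_nil] at hp
    show PySem.Set.contains ((pvB_build acc []).2.1.getD p []) j = _
    rw [show pvB_build acc [] = acc from rfl, List.append_nil]
    exact hhave p hp j
  | cons kv rest IH =>
    have hstep := IH (acc.1 ++ [(kv.1, kv.2)], acc.2.1 ++ [PySem.Set.ofList kv.2],
        kv.2.foldl (pvB_addIoc acc.1.length) acc.2.2)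
      (fun j => pv_add_fold_spec acc.1 acc.2.2 hspec kv.1 kv.2 j)
      (by simp [hlen])
      (by
        dsimp only
        intro p hp j
        simp only [List.length_append, List.length_cons, List.length_nil] at hp
        by_cases hpl : p < acc.1.length
        · rw [List.getD_append _ _ _ _ (by omega), List.getD_append _ _ _ _ hpl]
          exact hhave p hpl j
        · have hpe : p = acc.1.length := by omega
          subst hpe
          rw [List.getD_append_right _ _ _ _ (by omega), List.getD_append_right _ _ _ _ (by omega),
            hlen]
          simp)
    have hout : pvB_build acc (kv :: rest) =
        pvB_build (acc.1 ++ [(kv.1, kv.2)], acc.2.1 ++ [PySem.Set.ofList kv.2],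
          kv.2.foldl (pvB_addIoc acc.1.length) acc.2.2) rest := rfl
    have happ : (acc.1 ++ [(kv.1, kv.2)]) ++ rest = acc.1 ++ (kv :: rest) := by
      simp
    rw [hout]
    rw [happ] at hstep
    exact hstep

-- selection: with the index spec, min(hits) is the first overlapping position
theorem pv_sel_some (merged : List (Int × List String)) (ix : PySem.Dict String Nat)
    (hspec : ∀ j : String, ix.get? j = merged.findIdx? (fun kv => kv.2.contains j))
    (iocs : List String) (h : Nat) (t : List Nat)
    (hh : iocs.filterMap (fun i => ix.get? i) = h :: t) :
    merged.findIdx? (fun kv => iocs.any (fun i => kv.2.contains i)) = some (t.foldl min h) := by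
  set m := t.foldl min h with hm
  have hmin : PySem.List.min? (h :: t) (fun y => y) = some m := PySem.List.min?_id_cons h t
  have hmem : m ∈ h :: t := PySem.List.min?_mem hmin
  have hle : ∀ y ∈ h :: t, m ≤ y := fun y hy => PySem.List.min?_isMin hmin y hy
  rw [← hh] at hmem hle
  obtain ⟨i0, hi0, hgi0⟩ := List.mem_filterMap.mp hmem
  rw [hspec i0] at hgi0
  obtain ⟨hmlt, hpm, hmin'⟩ := List.findIdx?_eq_some_iff_getElem.mp hgi0
  rw [List.findIdx?_eq_some_iff_getElem]
  refine ⟨hmlt, ?_, ?_⟩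
  · exact List.any_eq_true.mpr ⟨i0, hi0, hpm⟩
  · intro jj hjj hP
    obtain ⟨i1, hi1, hci1⟩ := List.any_eq_true.mp hP
    have hne : merged.findIdx? (fun kv => kv.2.contains i1) ≠ none := by
      intro hnone
      have := List.findIdx?_eq_none_iff.mp hnone merged[jj] (List.getElem_mem _)
      rw [this] at hci1; exact Bool.false_ne_true hci1
    cases hfi : merged.findIdx? (fun kv => kv.2.contains i1) with
    | none => exact hne hfi
    | some m1 =>
      obtain ⟨hm1lt, _, hm1min⟩ := List.findIdx?_eq_some_iff_getElem.mp hfi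
      have hm1le : m1 ≤ jj := by
        by_contra hc
        exact hm1min jj (by omega) hci1
      have hm1hit : m1 ∈ iocs.filterMap (fun i => ix.get? i) :=
        List.mem_filterMap.mpr ⟨i1, hi1, by rw [hspec i1]; exact hfi⟩
      have := hle m1 hm1hit
      omega

theorem pv_sel_none (merged : List (Int × List String)) (ix : PySem.Dict String Nat)
    (hspec : ∀ j : String, ix.get? j = merged.findIdx? (fun kv => kv.2.contains j))
    (iocs : List String)
    (hh : iocs.filterMap (fun i => ix.get? i) = []) :
    merged.findIdx? (fun kv => iocs.any (fun i => kv.2.contains i)) = none := by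
  rw [List.findIdx?_eq_none_iff]
  intro kv hkv
  rw [List.any_eq_false]
  intro i hi
  have := List.filterMap_eq_nil_iff.mp hh i hi
  rw [hspec i] at this
  have h2 := List.findIdx?_eq_none_iff.mp this kv hkv
  intro hmem
  rw [h2] at hmem
  exact Bool.false_ne_true hmem

-- Dict.insert at a key sitting at position n of a Nodup-keys items list is List.set
theorem pv_insert_eq_set (merged : List (Int × List String)) (n : Nat) (hn : n < merged.length)
    (hnd : (merged.map Prod.fst).Nodup) (v : List String) :
    (PySem.Dict.mk merged).insert merged[n].1 v = PySem.Dict.mk (merged.set n (merged[n].1, v)) := by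
  have hc : (PySem.Dict.mk merged).contains merged[n].1 = true := by
    rw [PySem.Dict.contains_iff_mem_keys]
    exact List.mem_map_of_mem (List.getElem_mem hn)
  rw [PySem.Dict.insert, if_pos hc]
  congr 1
  apply List.ext_getElem
  · simp
  · intro l hl1 hl2
    have hml : l < merged.length := by simpa using hl2
    simp only [List.getElem_map, List.getElem_set]
    by_cases he : n = l
    · subst he; simp
    · have hne : (merged[l]'hml).1 ≠ merged[n].1 := by
        intro heq
        have h1 : (merged.map Prod.fst)[l]'(by simpa using hml) =
            (merged.map Prod.fst)[n]'(by simpa using hn) := by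
          simp only [List.getElem_map]; exact heq
        exact he ((List.Nodup.getElem_inj_iff hnd).mp h1).symm
      rw [if_neg he]
      have hb : ((merged[l]'hml).1 == merged[n].1) = false := by simpa using hne
      simp [hb]

theorem pv_insert_fresh (merged : List (Int × List String)) (k : Int)
    (hk : ∀ kv ∈ merged, kv.1 ≠ k) (v : List String) :
    (PySem.Dict.mk merged).insert k v = PySem.Dict.mk (merged ++ [(k, v)]) := by
  have hc : (PySem.Dict.mk merged).contains k = false := by
    rw [← Bool.not_eq_true, PySem.Dict.contains_iff_mem_keys]
    intro hmem
    obtain ⟨kv, hkv, hfst⟩ := List.mem_map.mp hmem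
    exact hk kv hkv hfst
  rw [PySem.Dict.insert, if_neg (by simp [hc])]

-- one step of the simulation: A's step equals B's step and the invariant is preserved
theorem pv_step_sim (merged : List (Int × List String)) (hvs : List (PySem.Set String))
    (ix : PySem.Dict String Nat) (next : Int)
    (item : Int × List String) (hinv : pvInv merged hvs ix next) :
    pvA_step (PySem.Dict.mk merged, next) item =
      (PySem.Dict.mk (pvB_step (merged, hvs, ix, next) item).1,
       (pvB_step (merged, hvs, ix, next) item).2.2.2) ∧
    pvInv (pvB_step (merged, hvs, ix, next) item).1 (pvB_step (merged, hvs, ix, next) item).2.1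
      (pvB_step (merged, hvs, ix, next) item).2.2.1
      (pvB_step (merged, hvs, ix, next) item).2.2.2 := by
  obtain ⟨hnd, hbnd, hspec, hlen, hhave⟩ := hinv
  cases hh : item.2.filterMap (fun i => ix.get? i) with
  | nil =>
    have hsel := pv_sel_none merged ix hspec item.2 hh
    have hfind : merged.find? (fun kv => item.2.any (fun i => kv.2.contains i)) = none :=
      List.find?_eq_none.mpr (fun x hx => by
        have := List.findIdx?_eq_none_iff.mp hsel x hx
        simpa using this)
    have hB : pvB_step (merged, hvs, ix, next) item =
        (merged ++ [(next, item.2)], hvs ++ [PySem.Set.ofList item.2],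
         item.2.foldl (pvB_addIoc merged.length) ix, next + 1) := by
      unfold pvB_step
      simp only [hh]
    rw [hB]
    dsimp only
    refine ⟨?_, ?_, ?_, ?_, ?_, ?_⟩
    · unfold pvA_step
      simp only [hfind]
      rw [pv_insert_fresh merged next (fun kv hkv => by have := hbnd kv hkv; omega) item.2]
    · have hmap : (merged ++ [(next, item.2)]).map Prod.fst =
          merged.map Prod.fst ++ [next] := by simp
      rw [hmap]
      refine List.Nodup.append hnd (List.nodup_singleton _) ?_
      intro a ha hb
      simp only [List.mem_singleton] at hb
      subst hb
      obtain ⟨kv, hkv, hfst⟩ := List.mem_map.mp ha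
      have := hbnd kv hkv
      omega
    · intro kv hkv
      rcases List.mem_append.mp hkv with hkv | hkv
      · have := hbnd kv hkv; omega
      · simp only [List.mem_singleton] at hkv; subst hkv; omega
    · intro j
      exact pv_add_fold_spec merged ix hspec next item.2 j
    · simp [hlen]
    · intro p hp j
      simp only [List.length_append, List.length_cons, List.length_nil] at hp
      by_cases hpl : p < merged.length
      · rw [List.getD_append _ _ _ _ (by omega), List.getD_append _ _ _ _ hpl]
        exact hhave p hpl j
      · have hpe : p = merged.length := by omega
        subst hpe
        rw [List.getD_append_right _ _ _ _ (by omega), List.getD_append_right _ _ _ _ (by omega), hlen]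
        simp
  | cons h t =>
    have hsel := pv_sel_some merged ix hspec item.2 h t hh
    obtain ⟨hpos, hfind⟩ := pv_find?_of_findIdx? merged _ _ hsel
    have htkv : merged.getD (t.foldl min h) (0, []) = merged[t.foldl min h] :=
      List.getD_eq_getElem merged _ hpos
    set pos := t.foldl min h with hposdef
    set hv := hvs.getD pos [] with hhv
    set news := item.2.filter (fun ioc => !(PySem.Set.contains hv ioc)) with hnews
    have hcontold : ∀ j : String, PySem.Set.contains hv j = (merged[pos]).2.contains j := by
      intro j
      rw [hhv, hhave pos hpos j, htkv]
    have hnewsA : item.2.filter (fun i => !(merged[pos]).2.contains i) = news := by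
      rw [hnews]
      apply List.filter_congr
      intro i _
      rw [hcontold]
    have hnewsmem : ∀ j ∈ news, j ∈ item.2 ∧ j ∉ (merged[pos]).2 := by
      intro j hj
      rw [hnews] at hj
      obtain ⟨h1, h2⟩ := List.mem_filter.mp hj
      refine ⟨h1, ?_⟩
      intro hmem
      rw [hcontold, List.contains_iff_mem.mpr hmem] at h2
      simp at h2
    have hB : pvB_step (merged, hvs, ix, next) item =
        (merged.set pos ((merged[pos]).1, (merged[pos]).2 ++ news),
         hvs.set pos (PySem.Set.update hv news),
         news.foldl (pvB_relax pos) ix, next) := by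
      unfold pvB_step
      simp only [hh, htkv]
      rfl
    rw [hB]
    dsimp only
    have hgetD : (PySem.Dict.mk merged).getD (merged[pos]).1 [] = (merged[pos]).2 := by
      have hmem : ((merged[pos]).1, (merged[pos]).2) ∈ (PySem.Dict.mk merged).items := by
        simp only [Prod.mk.eta]
        exact List.getElem_mem hpos
      exact PySem.Dict.getD_of_mem_items (PySem.Dict.mk merged) hmem hnd []
    have hcontap : ∀ (j : String), ((merged[pos]).2 ++ news).contains j =
        ((merged[pos]).2.contains j || news.contains j) := by
      intro j
      simp [List.mem_append]
    refine ⟨?_, ?_, ?_, ?_, ?_, ?_⟩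
    · unfold pvA_step
      simp only [hfind]
      rw [PySem.Dict.modify, hgetD, hnewsA,
        pv_insert_eq_set merged pos hpos hnd ((merged[pos]).2 ++ news)]
    · have hmap : (merged.set pos ((merged[pos]).1, (merged[pos]).2 ++ news)).map Prod.fst =
          merged.map Prod.fst := by
        apply List.ext_getElem
        · simp
        · intro l hl1 hl2
          have hml : l < merged.length := by simpa using hl2
          simp only [List.getElem_map, List.getElem_set]
          by_cases he : pos = l
          · subst he; simp
          · rw [if_neg he]
      rw [hmap]
      exact hnd
    · intro kv hkv
      rcases List.mem_or_eq_of_mem_set hkv with hkv | hkv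
      · exact hbnd kv hkv
      · subst hkv
        exact hbnd merged[pos] (List.getElem_mem hpos)
    · intro j
      rw [pv_relax_fold]
      by_cases hjn : j ∈ news
      · obtain ⟨hj2, hjold⟩ := hnewsmem j hjn
        have hnew : (((merged[pos]).1, (merged[pos]).2 ++ news)).2.contains j = true := by
          simp only [hcontap, List.contains_iff_mem.mpr hjn, Bool.or_true]
        have hold : (merged[pos]).2.contains j = false := by
          rw [← Bool.not_eq_true, List.contains_iff_mem]
          exact hjold
        rw [if_pos hjn, pv_findIdx_set_new merged pos _ _ hpos hnew hold, hspec j]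
      · have hnc : news.contains j = false := by
          rw [← Bool.not_eq_true, List.contains_iff_mem]
          exact hjn
        have hsame : (((merged[pos]).1, (merged[pos]).2 ++ news)).2.contains j =
            (merged[pos]).2.contains j := by
          simp only [hcontap, hnc, Bool.or_false]
        rw [if_neg hjn, pv_findIdx_set_same merged pos _ _ hpos hsame, hspec j]
    · simp [hlen]
    · intro p hp j
      rw [List.length_set] at hp
      have hphv : pos < hvs.length := by omega
      by_cases hpe : p = pos
      · subst hpe
        rw [List.getD_eq_getElem _ _ (by rw [List.length_set]; omega),
          List.getD_eq_getElem _ _ (by rw [List.length_set]; exact hp)]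
        simp only [List.getElem_set, if_true]
        rw [pv_update_contains, hcontold, hcontap]
      · rw [List.getD_eq_getElem _ _ (by rw [List.length_set]; omega),
          List.getD_eq_getElem _ _ (by rw [List.length_set]; exact hp),
          List.getElem_set, List.getElem_set, if_neg (fun hq => hpe hq.symm),
          if_neg (fun hq => hpe hq.symm),
          ← List.getD_eq_getElem hvs [] (by omega), ← List.getD_eq_getElem merged (0, []) hp]
        exact hhave p hp j

theorem pv_fold_sim (items : List (Int × List String)) (merged : List (Int × List String))
    (hvs : List (PySem.Set String)) (ix : PySem.Dict String Nat) (next : Int)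
    (hinv : pvInv merged hvs ix next) :
    items.foldl pvA_step (PySem.Dict.mk merged, next) =
      (PySem.Dict.mk (items.foldl pvB_step (merged, hvs, ix, next)).1,
       (items.foldl pvB_step (merged, hvs, ix, next)).2.2.2) ∧
    pvInv (items.foldl pvB_step (merged, hvs, ix, next)).1
      (items.foldl pvB_step (merged, hvs, ix, next)).2.1
      (items.foldl pvB_step (merged, hvs, ix, next)).2.2.1
      (items.foldl pvB_step (merged, hvs, ix, next)).2.2.2 := by
  induction items generalizing merged hvs ix next with
  | nil => exact ⟨rfl, hinv⟩
  | cons item rest IH =>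
    obtain ⟨heq, hinv'⟩ := pv_step_sim merged hvs ix next item hinv
    rw [List.foldl_cons, List.foldl_cons, heq]
    exact IH (pvB_step (merged, hvs, ix, next) item).1 (pvB_step (merged, hvs, ix, next) item).2.1
      (pvB_step (merged, hvs, ix, next) item).2.2.1
      (pvB_step (merged, hvs, ix, next) item).2.2.2 hinv'

theorem pv_ofList_items (xs : List (Int × List String)) (hnd : (xs.map Prod.fst).Nodup) :
    (PySem.Dict.ofList xs).items = xs := by
  have := PySem.Dict.items_foldl_insert_fresh xs Prod.fst Prod.snd PySem.Dict.empty
    (fun a _ => PySem.Dict.contains_empty _) hnd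
  simpa [PySem.Dict.ofList, PySem.Dict.update, PySem.Dict.empty] using this

theorem pv_maxD_bound (keys : List Int) (k : Int) (hk : k ∈ keys) :
    k ≤ PySem.List.maxD keys (fun k => k) (-1) := by
  unfold PySem.List.maxD
  cases hm : PySem.List.max? keys (fun k => k) with
  | none => rw [PySem.List.max?_eq_none_iff] at hm; subst hm; simp at hk
  | some m => simpa using PySem.List.max?_isMax hm k hk

-- ===== VERDICT (by name: the statement is the Claim_ definition above) =====
theorem merge_campaigns_py_spec : Claim_equal_merge_campaigns_py := by
  intro c1 c2 _
  unfold Spec_merge_campaigns_py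
  obtain ⟨hm, hspec0, hlen0, hhave0⟩ := pv_build_props (PySem.Dict.ofList c1).items
    ([], [], PySem.Dict.empty)
    (fun j => by simp [PySem.Dict.get?_empty])
    (by simp)
    (by intro p hp j; simp at hp)
  rw [List.nil_append] at hm hspec0 hlen0 hhave0
  have hnd0 : (((PySem.Dict.ofList c1).items).map Prod.fst).Nodup :=
    PySem.Dict.nodup_keys_ofList c1
  have hb0 : ∀ kv ∈ (PySem.Dict.ofList c1).items,
      kv.1 < PySem.List.maxD (PySem.Dict.ofList c1).keys (fun k => k) (-1) + 1 := by
    intro kv hkv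
    have hmem : kv.1 ∈ (PySem.Dict.ofList c1).keys := List.mem_map_of_mem hkv
    have := pv_maxD_bound _ _ hmem
    omega
  have hinv0 : pvInv (PySem.Dict.ofList c1).items
      (pvB_build ([], [], PySem.Dict.empty) (PySem.Dict.ofList c1).items).2.1
      (pvB_build ([], [], PySem.Dict.empty) (PySem.Dict.ofList c1).items).2.2
      (PySem.List.maxD (PySem.Dict.ofList c1).keys (fun k => k) (-1) + 1) :=
    ⟨hnd0, hb0, fun j => (hspec0 j), hlen0, hhave0⟩
  obtain ⟨heq, hinvF⟩ := pv_fold_sim (PySem.Dict.ofList c2).items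
    (PySem.Dict.ofList c1).items
    (pvB_build ([], [], PySem.Dict.empty) (PySem.Dict.ofList c1).items).2.1
    (pvB_build ([], [], PySem.Dict.empty) (PySem.Dict.ofList c1).items).2.2
    (PySem.List.maxD (PySem.Dict.ofList c1).keys (fun k => k) (-1) + 1)
    hinv0
  have hA : PySem.Dict.mk (PySem.Dict.ofList c1).items = PySem.Dict.ofList c1 := rfl
  rw [hA] at heq
  have e1 : merge_campaigns_py c1 c2 =
      ((PySem.Dict.ofList c2).items.foldl pvA_step (PySem.Dict.ofList c1,
        PySem.List.maxD (PySem.Dict.ofList c1).keys (fun k => k) (-1) + 1)).1.items := rfl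
  have e2 : merge_campaigns_py_alt c1 c2 =
      (PySem.Dict.ofList ((PySem.Dict.ofList c2).items.foldl pvB_step
        ((pvB_build ([], [], PySem.Dict.empty) (PySem.Dict.ofList c1).items).1,
         (pvB_build ([], [], PySem.Dict.empty) (PySem.Dict.ofList c1).items).2.1,
         (pvB_build ([], [], PySem.Dict.empty) (PySem.Dict.ofList c1).items).2.2,
         PySem.List.maxD (PySem.Dict.ofList c1).keys (fun k => k) (-1) + 1)).1).items := rfl
  rw [e1, e2, hm, heq, pv_ofList_items _ hinvF.1]
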